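-- pv_equiv track=rewrite | github.com/vanthuyphan/van-pier | agent_runtime/main.py | _looks_like_action
-- ===== SOURCE A (Python) =====
-- def _looks_like_action(text: str) -> bool:
--     """Heuristic: does the response look like the agent wants to take an action?"""
--     action_indicators = [
--         "I'll send", "I will send",
--         "I'll create", "I will create",
--         "I'll update", "I will update",
--         "I'll delete", "I will delete",
--         "I'll post", "I will post",
--         "sending email", "drafting email",
--         "here's the draft", "here is the draft",
--     ]
--     text_lower = text.lower()
--     return any(indicator in text_lower for indicator in action_indicators)
-- ===== SOURCE B (Python) =====
-- def _looks_like_action(text: str) -> bool: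
--     """Heuristic: does the response look like the agent wants to take an action?"""
--     fixed = ("sending email", "drafting email", "here's the draft", "here is the draft")
--     prefixes = ("i'll ", "i will ")
--     verbs = ("send", "create", "update", "delete", "post")
--     t = text.lower()
--     for i in range(len(t)):
--         if t.startswith(fixed, i):
--             return True
--         for p in prefixes:
--             if t.startswith(p, i) and t.startswith(verbs, i + len(p)):
--                 return True
--     return False
-- ===== Notes on version B (the rewrite author's own statement) =====
-- stated objective: alternative
-- what changed: Replaces the flat 14-indicator list scanned with one 'in'-containment per indicator by a single left-to-right scan over the lowered text that at each position checks a compositional pattern table (two 'I will'-style prefixes crossed with five verbs, plus four fixed phrases) via startswith; it also lower-cases the action phrases, fixing A's dead mixed-case indicators.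
-- intended difference: On texts whose lower-cased form contains an i'll/i will prefix immediately followed by one of the five action verbs but contains none of the four all-lowercase indicators, A returns False because its ten mixed-case indicators contain a capital I yet are matched against the lower-cased text, so they can never match, while B returns True, which is the evidently intended behaviour of the heuristic. — e.g. on _looks_like_action("I'll send it"): A returns false, B returns true
import Mathlib
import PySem

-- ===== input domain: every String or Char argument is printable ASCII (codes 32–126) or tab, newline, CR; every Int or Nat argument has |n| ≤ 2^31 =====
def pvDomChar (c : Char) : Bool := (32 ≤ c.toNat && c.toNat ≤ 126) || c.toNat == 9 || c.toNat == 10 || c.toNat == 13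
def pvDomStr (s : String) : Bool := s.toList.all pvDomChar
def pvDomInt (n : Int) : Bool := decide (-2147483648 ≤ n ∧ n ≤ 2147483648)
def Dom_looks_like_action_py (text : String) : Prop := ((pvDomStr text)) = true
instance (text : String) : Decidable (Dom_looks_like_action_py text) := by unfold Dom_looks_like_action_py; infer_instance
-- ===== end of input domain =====

-- B replaces A's flat indicator list (one containment scan per indicator) by a single positional
-- scan with a compositional prefix×verb pattern table, and lower-cases the patterns — fixing A's
-- mixed-case indicators, which can never match the lower-cased text (stated as D_ below).

-- ===== PORT A =====
def pvIndicators : List String :=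
  ["I'll send", "I will send",
   "I'll create", "I will create",
   "I'll update", "I will update",
   "I'll delete", "I will delete",
   "I'll post", "I will post",
   "sending email", "drafting email",
   "here's the draft", "here is the draft"]

def looks_like_action_py (text : String) : Bool :=
  let text_lower := PySem.Str.lower text
  pvIndicators.any (fun indicator => PySem.Str.isIn indicator text_lower)

-- ===== PORT B =====
def pvFixed : List (List Char) :=
  ["sending email".toList, "drafting email".toList,
   "here's the draft".toList, "here is the draft".toList]
def pvPrefixes : List (List Char) := ["i'll ".toList, "i will ".toList]
def pvVerbs : List (List Char) :=
  ["send".toList, "create".toList, "update".toList, "delete".toList, "post".toList]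

-- Source B's 'for i in range(len(t)): …' loop over start positions, as structural recursion on the suffix
-- starting at i ('t.startswith(pat, i)' = 'PySem.Chars.startswith <suffix> pat')
def pvScan : List Char → Bool
  | [] => false
  | c :: cs =>
    if pvFixed.any (fun f => PySem.Chars.startswith (c :: cs) f) then true
    else if pvPrefixes.any (fun p => PySem.Chars.startswith (c :: cs) p &&
              pvVerbs.any (fun v => PySem.Chars.startswith ((c :: cs).drop p.length) v)) then true
    else pvScan cs

def looks_like_action_py_alt (text : String) : Bool :=
  pvScan (PySem.Chars.lower text.toList)

-- ===== PRECONDITION & SPEC =====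
-- On texts whose lower-cased form contains an i'll/i will prefix immediately followed by one of
-- the five action verbs but contains none of the four all-lowercase indicators, A returns false
-- (its ten mixed-case indicators contain a capital I yet are matched against the lower-cased text,
-- so they can never match) while B returns true, the intended behaviour of the heuristic.
def D_looks_like_action_py (text : String) : Prop :=
  let l := PySem.Chars.lower text.toList
  (∃ q ∈ pvIndicators, 'I' ∈ q.toList ∧ PySem.Chars.isIn (PySem.Chars.lower q.toList) l = true) ∧
  ∀ q ∈ pvIndicators, 'I' ∉ q.toList → PySem.Chars.isIn q.toList l = false
instance (text : String) : Decidable (D_looks_like_action_py text) := by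
  unfold D_looks_like_action_py; infer_instance

def Spec_looks_like_action_py (text : String) (out : Bool) : Prop :=
  ¬ D_looks_like_action_py text → out = looks_like_action_py_alt text
instance (text : String) (out : Bool) : Decidable (Spec_looks_like_action_py text out) := by
  unfold Spec_looks_like_action_py; infer_instance

def pvDiffWitness_looks_like_action_py : String := "I'll send it"
def pvDiffWitnessOut_looks_like_action_py : Bool × Bool := (false, true)

-- ===== CLAIM (what is proved, stated in full; the proofs are below) =====
def Claim_unchanged_looks_like_action_py : Prop := ∀ (text : String), Dom_looks_like_action_py text → Spec_looks_like_action_py text (looks_like_action_py text)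
def Claim_changed_looks_like_action_py : Prop := Dom_looks_like_action_py (pvDiffWitness_looks_like_action_py) ∧ D_looks_like_action_py (pvDiffWitness_looks_like_action_py) ∧ looks_like_action_py (pvDiffWitness_looks_like_action_py) = pvDiffWitnessOut_looks_like_action_py.1 ∧ looks_like_action_py_alt (pvDiffWitness_looks_like_action_py) = pvDiffWitnessOut_looks_like_action_py.2 ∧ pvDiffWitnessOut_looks_like_action_py.1 ≠ pvDiffWitnessOut_looks_like_action_py.2
def Claim_exact_looks_like_action_py : Prop := ∀ (text : String), Dom_looks_like_action_py text → D_looks_like_action_py text → looks_like_action_py text ≠ looks_like_action_py_alt text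

-- ===== LEMMAS AND PROOFS =====

-- the four all-lowercase indicators and the lower-casings of the ten mixed-case ones, as char lists
def pvFixedD : List (List Char) :=
  ["sending email".toList, "drafting email".toList,
   "here's the draft".toList, "here is the draft".toList]
def pvCompositeD : List (List Char) :=
  ["i'll send".toList, "i'll create".toList, "i'll update".toList,
   "i'll delete".toList, "i'll post".toList,
   "i will send".toList, "i will create".toList, "i will update".toList,
   "i will delete".toList, "i will post".toList]


-- a lower-cased character is never the capital 'I'
theorem pvLowerChar_ne_I (c : Char) : PySem.Chars.lowerChar c ≠ 'I' := by
  unfold PySem.Chars.lowerChar PySem.Chars.isupper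
  split
  · next hcond =>
    simp only [Bool.and_eq_true, decide_eq_true_eq] at hcond
    obtain ⟨h1, h2⟩ := hcond
    intro h
    have hb1 : 65 ≤ c.toNat := by
      simpa [Char.le_def, UInt32.le_iff_toNat_le] using h1
    have hb2 : c.toNat ≤ 90 := by
      simpa [Char.le_def, UInt32.le_iff_toNat_le] using h2
    have hv : (Char.ofNat (c.toNat + 32)).toNat = c.toNat + 32 := by
      rw [Char.toNat_ofNat, if_pos]
      unfold Nat.isValidChar
      left; omega
    have h73 := congrArg Char.toNat h
    rw [hv] at h73
    have : ('I' : Char).toNat = 73 := by decide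
    omega
  · next hcond =>
    intro h
    rw [h] at hcond
    simp at hcond

theorem pvI_not_mem_lower (l : List Char) : 'I' ∉ PySem.Chars.lower l := by
  simp only [PySem.Chars.lower, List.mem_map, not_exists]
  intro x
  exact fun h => absurd h.2 (pvLowerChar_ne_I x)

-- any indicator containing a capital 'I' can never occur in the lower-cased text
theorem pvDead (sub l : List Char) (h : 'I' ∈ sub) :
    PySem.Chars.isIn sub (PySem.Chars.lower l) = false := by
  cases hb : PySem.Chars.isIn sub (PySem.Chars.lower l) with
  | false => rfl
  | true =>
    exact absurd (((PySem.Chars.isIn_iff_infix _ _).1 hb).subset h) (pvI_not_mem_lower l)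

-- A's value is decided by the four all-lowercase indicators alone
theorem pvCharA (text : String) :
    looks_like_action_py text
      = pvFixedD.any (fun f => PySem.Chars.isIn f (PySem.Chars.lower text.toList)) := by
  simp only [looks_like_action_py, pvIndicators, pvFixedD, List.any_cons, List.any_nil,
    PySem.Str.isIn_eq, PySem.Str.toList_lower]
  rw [pvDead "I'll send".toList text.toList (by decide),
      pvDead "I will send".toList text.toList (by decide),
      pvDead "I'll create".toList text.toList (by decide),
      pvDead "I will create".toList text.toList (by decide),
      pvDead "I'll update".toList text.toList (by decide),
      pvDead "I will update".toList text.toList (by decide),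
      pvDead "I'll delete".toList text.toList (by decide),
      pvDead "I will delete".toList text.toList (by decide),
      pvDead "I'll post".toList text.toList (by decide),
      pvDead "I will post".toList text.toList (by decide)]
  simp

theorem pvPrefAppend (p v s : List Char) :
    p ++ v <+: s ↔ p <+: s ∧ v <+: s.drop p.length := by
  induction p generalizing s with
  | nil => simp
  | cons a p' ih =>
    cases s with
    | nil => simp
    | cons b s' => simp [List.cons_prefix_cons, ih, and_assoc]

theorem pvSwAppend (s p v : List Char) :
    PySem.Chars.startswith s (p ++ v)
      = (PySem.Chars.startswith s p && PySem.Chars.startswith (s.drop p.length) v) := by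
  rw [Bool.eq_iff_iff]
  simp [PySem.Chars.startswith_iff, pvPrefAppend]

theorem pvIsInCons (q : List Char) (c : Char) (cs : List Char) :
    PySem.Chars.isIn q (c :: cs)
      = (PySem.Chars.startswith (c :: cs) q || PySem.Chars.isIn q cs) := by
  rw [Bool.eq_iff_iff]
  simp [PySem.Chars.isIn_iff_infix, PySem.Chars.startswith_iff, List.infix_cons_iff]

theorem pvAnyOr {α : Type} (l : List α) (f g : α → Bool) :
    l.any (fun x => f x || g x) = (l.any f || l.any g) := by
  induction l with
  | nil => rfl
  | cons a t ih => simp only [List.any_cons, ih]; cases f a <;> cases g a <;> simp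

theorem pvAnyAnd {α : Type} (l : List α) (b : Bool) (g : α → Bool) :
    l.any (fun x => b && g x) = (b && l.any g) := by
  cases b <;> simp

theorem pvIteOr (a b r : Bool) :
    (if a then true else if b then true else r) = (a || b || r) := by
  cases a <;> cases b <;> simp

-- the position check of B equals one startswith per phrase of the combined table
theorem pvPosCheck (s : List Char) :
    (pvFixed.any (fun f => PySem.Chars.startswith s f)
      || pvPrefixes.any (fun p => PySem.Chars.startswith s p &&
            pvVerbs.any (fun v => PySem.Chars.startswith (s.drop p.length) v)))
    = (pvFixedD ++ pvCompositeD).any (fun q => PySem.Chars.startswith s q) := by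
  have hcomp : pvCompositeD
      = pvPrefixes.flatMap (fun p => pvVerbs.map (fun v => p ++ v)) := by decide
  have hfix : pvFixedD = pvFixed := rfl
  rw [List.any_append, hcomp, hfix, List.any_flatMap]
  congr 1
  refine List.any_congr rfl ?_
  intro p
  rw [List.any_map]
  simp only [Function.comp_def, pvSwAppend]
  rw [pvAnyAnd]

-- B's scan finds exactly the phrases of the combined table occurring in s
theorem pvCharScan (s : List Char) :
    pvScan s = (pvFixedD ++ pvCompositeD).any (fun q => PySem.Chars.isIn q s) := by
  induction s with
  | nil =>
    simp only [pvScan]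
    symm
    rw [List.any_eq_false]
    intro q hq
    cases hb : PySem.Chars.isIn q [] with
    | false => simp
    | true =>
      have := ((PySem.Chars.isIn_iff_infix _ _).1 hb)
      rw [List.infix_nil] at this
      subst this
      revert hq
      decide
  | cons c cs ih =>
    rw [pvScan, pvIteOr, pvPosCheck, ih]
    have : ∀ q, PySem.Chars.isIn q (c :: cs)
        = (PySem.Chars.startswith (c :: cs) q || PySem.Chars.isIn q cs) := fun q => pvIsInCons q c cs
    rw [List.any_congr rfl this, pvAnyOr]

theorem pvCharB (text : String) :
    looks_like_action_py_alt text
      = (pvFixedD.any (fun f => PySem.Chars.isIn f (PySem.Chars.lower text.toList))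
         || pvCompositeD.any (fun q => PySem.Chars.isIn q (PySem.Chars.lower text.toList))) := by
  rw [looks_like_action_py_alt, pvCharScan, List.any_append]

-- D_ (an infix property of the input) in the Bool form the characterisations use
theorem pvDIff (text : String) :
    D_looks_like_action_py text
      ↔ (pvCompositeD.any (fun q => PySem.Chars.isIn q (PySem.Chars.lower text.toList)) = true ∧
         pvFixedD.any (fun f => PySem.Chars.isIn f (PySem.Chars.lower text.toList)) = false) := by
  unfold D_looks_like_action_py
  constructor
  · rintro ⟨⟨q, hq, hI, hin⟩, hall⟩
    refine ⟨?_, ?_⟩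
    · rw [List.any_eq_true]
      refine ⟨PySem.Chars.lower q.toList, ?_, hin⟩
      unfold pvIndicators at hq
      fin_cases hq <;> first | exact absurd hI (by decide) | decide
    · rw [List.any_eq_false]
      intro f hf
      unfold pvFixedD at hf
      fin_cases hf <;> exact (by rw [hall _ (by decide) (by decide)]; simp)
  · rintro ⟨hC, hF⟩
    rw [List.any_eq_true] at hC
    obtain ⟨ql, hqmem, hin⟩ := hC
    rw [List.any_eq_false] at hF
    refine ⟨?_, ?_⟩
    · unfold pvCompositeD at hqmem
      fin_cases hqmem
      · exact ⟨"I'll send", by decide, by decide,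
          by rw [show PySem.Chars.lower "I'll send".toList = "i'll send".toList from by decide]; exact hin⟩
      · exact ⟨"I'll create", by decide, by decide,
          by rw [show PySem.Chars.lower "I'll create".toList = "i'll create".toList from by decide]; exact hin⟩
      · exact ⟨"I'll update", by decide, by decide,
          by rw [show PySem.Chars.lower "I'll update".toList = "i'll update".toList from by decide]; exact hin⟩
      · exact ⟨"I'll delete", by decide, by decide,
          by rw [show PySem.Chars.lower "I'll delete".toList = "i'll delete".toList from by decide]; exact hin⟩
      · exact ⟨"I'll post", by decide, by decide,
          by rw [show PySem.Chars.lower "I'll post".toList = "i'll post".toList from by decide]; exact hin⟩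
      · exact ⟨"I will send", by decide, by decide,
          by rw [show PySem.Chars.lower "I will send".toList = "i will send".toList from by decide]; exact hin⟩
      · exact ⟨"I will create", by decide, by decide,
          by rw [show PySem.Chars.lower "I will create".toList = "i will create".toList from by decide]; exact hin⟩
      · exact ⟨"I will update", by decide, by decide,
          by rw [show PySem.Chars.lower "I will update".toList = "i will update".toList from by decide]; exact hin⟩
      · exact ⟨"I will delete", by decide, by decide,
          by rw [show PySem.Chars.lower "I will delete".toList = "i will delete".toList from by decide]; exact hin⟩
      · exact ⟨"I will post", by decide, by decide,
          by rw [show PySem.Chars.lower "I will post".toList = "i will post".toList from by decide]; exact hin⟩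
    · intro q hq hIq
      unfold pvIndicators at hq
      fin_cases hq <;>
        first
          | exact absurd (by decide) hIq
          | exact (Bool.not_eq_true _).mp (hF _ (by decide))

-- ===== VERDICT (by name: the statement is the Claim_ definition above) =====
theorem looks_like_action_py_spec : Claim_unchanged_looks_like_action_py := by
  intro text _ hnd
  rw [pvCharA, pvCharB]
  rw [pvDIff] at hnd
  cases hF : pvFixedD.any (fun f => PySem.Chars.isIn f (PySem.Chars.lower text.toList)) with
  | true => simp
  | false =>
    cases hC : pvCompositeD.any (fun q => PySem.Chars.isIn q (PySem.Chars.lower text.toList)) with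
    | false => simp
    | true => exact absurd ⟨hC, hF⟩ hnd

theorem looks_like_action_py_changed : Claim_changed_looks_like_action_py := by
  unfold Claim_changed_looks_like_action_py; decide

theorem looks_like_action_py_tight : Claim_exact_looks_like_action_py := by
  intro text _ hd
  obtain ⟨hC, hF⟩ := (pvDIff text).1 hd
  rw [pvCharA, pvCharB, hC, hF]
  decide
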